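-- pv_equiv track=rewrite | github.com/speedingsmile/Projects | Encryption/encryption.py | enigma_cipher
-- ===== SOURCE A (Python) =====
-- class Rotor:
--     def __init__(self, wiring, notch):
--         self.wiring = wiring
--         self.notch = notch
--         self.position = 0
--
--     def forward(self, char):
--         shift = (ord(char) - ord('A') + self.position) % 26
--         return chr((ord(self.wiring[shift]) - ord('A') - self.position) % 26 + ord('A'))
--
--     def backward(self, char):
--         shift = (ord(char) - ord('A') + self.position) % 26
--         return chr((self.wiring.index(chr(shift + ord('A'))) - self.position) % 26 + ord('A'))
--
--     def rotate(self):
--         self.position = (self.position + 1) % 26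
--         return self.position == self.notch
--
-- class Reflector:
--     def __init__(self, wiring):
--         self.wiring = wiring
--
--     def reflect(self, char):
--         return self.wiring[ord(char) - ord('A')]
--
-- class EnigmaMachine:
--     def __init__(self, rotor1, rotor2, rotor3, reflector):
--         self.rotors = [rotor1, rotor2, rotor3]
--         self.reflector = reflector
--
--     def encrypt(self, message):
--         result = ""
--         for char in message.upper():
--             if char.isalpha():
--                 # Rotate rotors
--                 if self.rotors[0].rotate():
--                     if self.rotors[1].rotate():
--                         self.rotors[2].rotate()
--
--                 # Forward pass through rotors
--                 for rotor in self.rotors: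
--                     char = rotor.forward(char)
--
--                 # Reflect
--                 char = self.reflector.reflect(char)
--
--                 # Backward pass through rotors
--                 for rotor in reversed(self.rotors):
--                     char = rotor.backward(char)
--
--                 result += char
--             else:
--                 result += char
--         return result
--
--     def decrypt(self, message):
--         # Decryption is the same as encryption for the Enigma machine
--         return self.encrypt(message)
--
-- def enigma_cipher(message, key, encrypt=True):
--     # Define rotors and reflector
--     rotor1 = Rotor("EKMFLGDQVZNTOWYHXUSPAIBRCJ", 'Q')
--     rotor2 = Rotor("AJDKSIRUXBLHWTMCQGZNPYFVOE", 'E')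
--     rotor3 = Rotor("BDFHJLCPRTXVZNYEIWGAKMUSQO", 'V')
--     reflector = Reflector("YRUHQSLDPXNGOKMIEBFZCWVJAT")
--
--     # Set initial positions based on the key
--     for i, rotor in enumerate(key[:3]):
--         rotor_position = ord(rotor.upper()) - ord('A')
--         for _ in range(rotor_position):
--             [rotor1, rotor2, rotor3][i].rotate()
--
--     enigma = EnigmaMachine(rotor1, rotor2, rotor3, reflector)
--
--     # Encryption and decryption are the same for Enigma
--     return enigma.encrypt(message)
-- ===== SOURCE B (Python) =====
-- def enigma_cipher(message, key, encrypt=True):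
--     R1 = "EKMFLGDQVZNTOWYHXUSPAIBRCJ"
--     R2 = "AJDKSIRUXBLHWTMCQGZNPYFVOE"
--     R3 = "BDFHJLCPRTXVZNYEIWGAKMUSQO"
--     REF = "YRUHQSLDPXNGOKMIEBFZCWVJAT"
--
--     # initial rotor offsets from the key: rotor i is advanced ord(key[i].upper())-65 times
--     def pos0(i):
--         if i < len(key):
--             v = ord(key[i].upper()) - 65
--             if v > 0:
--                 return v % 26
--         return 0
--     p1, p2, p3 = pos0(0), pos0(1), pos0(2)
--
--     def inverse(w):
--         inv = [0] * 26
--         for i, ch in enumerate(w):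
--             inv[ord(ch) - 65] = i
--         return inv
--     inv1, inv2, inv3 = inverse(R1), inverse(R2), inverse(R3)
--
--     # In A's machine rotors 2 and 3 are stationary (its notch test compares an int
--     # position with a one-char string, never true), so everything between rotor 1's
--     # forward and backward pass is one fixed permutation of the alphabet:
--     mid = []
--     for c in range(26):
--         x = (ord(R2[(c + p2) % 26]) - 65 - p2) % 26
--         x = (ord(R3[(x + p3) % 26]) - 65 - p3) % 26
--         x = ord(REF[x]) - 65
--         x = (inv3[(x + p3) % 26] - p3) % 26
--         x = (inv2[(x + p2) % 26] - p2) % 26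
--         mid.append(x)
--
--     # precompute the whole machine as 26 substitution alphabets, one per rotor-1 position
--     table = []
--     for p in range(26):
--         row = ''.join(
--             chr((inv1[(mid[(ord(R1[(c + p) % 26]) - 65 - p) % 26] + p) % 26] - p) % 26 + 65)
--             for c in range(26))
--         table.append(row)
--
--     out = []
--     for ch in message.upper():
--         if ch.isalpha():
--             p1 = (p1 + 1) % 26
--             out.append(table[p1][ord(ch) - 65])
--         else:
--             out.append(ch)
--     return ''.join(out)
-- ===== Notes on version B (the rewrite author's own statement) =====
-- stated objective: faster
-- what changed: Instead of pushing each character through three forward rotor passes, a reflector and three backward passes with linear wiring.index scans, B observes that only rotor 1 ever moves (A's notch test compares an int with a str and never fires) and precomputes 26 substitution alphabets, one per rotor-1 position, so encryption is a single table lookup per character.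
import Mathlib
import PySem

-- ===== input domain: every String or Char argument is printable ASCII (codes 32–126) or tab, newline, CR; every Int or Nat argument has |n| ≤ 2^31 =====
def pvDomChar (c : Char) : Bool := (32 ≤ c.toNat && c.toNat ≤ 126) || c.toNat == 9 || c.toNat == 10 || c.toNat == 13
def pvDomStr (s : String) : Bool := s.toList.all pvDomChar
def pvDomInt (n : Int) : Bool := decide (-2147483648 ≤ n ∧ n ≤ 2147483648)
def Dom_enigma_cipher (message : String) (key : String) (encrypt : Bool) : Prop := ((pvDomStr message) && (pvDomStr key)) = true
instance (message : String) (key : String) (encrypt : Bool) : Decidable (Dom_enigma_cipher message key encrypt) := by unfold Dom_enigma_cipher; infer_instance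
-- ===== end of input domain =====

-- B replaces A's per-character six-pass rotor arithmetic (with linear `.index` scans) by 26
-- precomputed substitution alphabets, one per position of the only rotor that ever moves;
-- objective: faster (constant-factor, measured).

-- ===== PORT A =====
-- Rotor.forward: chr((ord(wiring[(ord(c)-65+pos)%26]) - 65 - pos) % 26 + 65)
def pvRotorFwd (w : List Char) (pos : Int) (c : Char) : Char :=
  let shift := PySem.Int.mod ((c.toNat : Int) - 65 + pos) 26
  Char.ofNat ((PySem.Int.mod (((PySem.List.pyGetD w shift 'A').toNat : Int) - 65 - pos) 26 + 65).toNat)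

-- Rotor.backward: wiring.index(ch) — ch is always a letter occurring in the 26-letter wiring,
-- so Python's str.index is exactly Chars.find (index of the first occurrence).
def pvRotorBwd (w : List Char) (pos : Int) (c : Char) : Char :=
  let shift := PySem.Int.mod ((c.toNat : Int) - 65 + pos) 26
  Char.ofNat ((PySem.Int.mod ((PySem.Chars.find w [Char.ofNat (shift + 65).toNat]) - pos) 26 + 65).toNat)

def pvReflect (w : List Char) (c : Char) : Char :=
  PySem.List.pyGetD w ((c.toNat : Int) - 65) 'A'

-- Rotor.rotate: position = (position+1) % 26.  Its return value 'self.position == self.notch'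
-- compares an int with a one-char str, which in Python is always False, so the cascade that
-- would step rotors 2 and 3 never fires; the ports carry only the position update.
def pvRotatePos (p : Int) : Int := PySem.Int.mod (p + 1) 26

def enigma_cipher (message : String) (key : String) (encrypt : Bool) : String :=
  let r1 := "EKMFLGDQVZNTOWYHXUSPAIBRCJ".toList
  let r2 := "AJDKSIRUXBLHWTMCQGZNPYFVOE".toList
  let r3 := "BDFHJLCPRTXVZNYEIWGAKMUSQO".toList
  let rf := "YRUHQSLDPXNGOKMIEBFZCWVJAT".toList
  -- for i, rotor in enumerate(key[:3]): for _ in range(ord(rotor.upper())-65): rotors[i].rotate()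
  let ps := (PySem.List.enumerate (PySem.List.slice key.toList none (some 3)) 0).foldl
    (fun (st : Int × Int × Int) iv =>
      let n := ((PySem.Chars.upperChar iv.2).toNat : Int) - 65
      let spin := fun (p : Int) => (PySem.List.pyRange 0 n 1).foldl (fun q _ => pvRotatePos q) p
      if iv.1 = 0 then (spin st.1, st.2.1, st.2.2)
      else if iv.1 = 1 then (st.1, spin st.2.1, st.2.2)
      else (st.1, st.2.1, spin st.2.2))
    (0, 0, 0)
  let fin := (PySem.Chars.upper message.toList).foldl
    (fun (st : Int × List Char) ch =>
      if PySem.Chars.isalpha ch then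
        let p1 := pvRotatePos st.1
        let c := pvRotorFwd r1 p1 ch
        let c := pvRotorFwd r2 ps.2.1 c
        let c := pvRotorFwd r3 ps.2.2 c
        let c := pvReflect rf c
        let c := pvRotorBwd r3 ps.2.2 c
        let c := pvRotorBwd r2 ps.2.1 c
        let c := pvRotorBwd r1 p1 c
        (p1, st.2 ++ [c])
      else (st.1, st.2 ++ [ch]))
    (ps.1, [])
  String.ofList fin.2

-- ===== PORT B =====
-- inverse(w): inv[ord(ch)-65] = i over enumerate(w)
def pvInv (w : List Char) : List Int :=
  (PySem.List.enumerate w 0).foldl (fun inv iv => inv.set (iv.2.toNat - 65) iv.1) (List.replicate 26 0)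

def pvPos0 (key : List Char) (i : Int) : Int :=
  if i < (key.length : Int) then
    let v := ((PySem.Chars.upperChar (PySem.List.pyGetD key i ' ')).toNat : Int) - 65
    if 0 < v then PySem.Int.mod v 26 else 0
  else 0

-- the fixed middle of the machine (rotor2/rotor3 forward, reflector, rotor3/rotor2 backward)
def pvMid (r2 r3 rf : List Char) (inv2 inv3 : List Int) (p2 p3 : Int) : List Int :=
  (PySem.List.pyRange 0 26 1).map (fun c =>
    let x := PySem.Int.mod (((PySem.List.pyGetD r2 (PySem.Int.mod (c + p2) 26) 'A').toNat : Int) - 65 - p2) 26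
    let x := PySem.Int.mod (((PySem.List.pyGetD r3 (PySem.Int.mod (x + p3) 26) 'A').toNat : Int) - 65 - p3) 26
    let x := ((PySem.List.pyGetD rf x 'A').toNat : Int) - 65
    let x := PySem.Int.mod (PySem.List.pyGetD inv3 (PySem.Int.mod (x + p3) 26) 0 - p3) 26
    PySem.Int.mod (PySem.List.pyGetD inv2 (PySem.Int.mod (x + p2) 26) 0 - p2) 26)

-- one substitution alphabet per rotor-1 position
def pvTable (r1 : List Char) (inv1 mid : List Int) : List (List Char) :=
  (PySem.List.pyRange 0 26 1).map (fun p =>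
    (PySem.List.pyRange 0 26 1).map (fun c =>
      Char.ofNat ((PySem.Int.mod (PySem.List.pyGetD inv1 (PySem.Int.mod (PySem.List.pyGetD mid (PySem.Int.mod (((PySem.List.pyGetD r1 (PySem.Int.mod (c + p) 26) 'A').toNat : Int) - 65 - p) 26) 0 + p) 26) 0 - p) 26 + 65).toNat)))

def enigma_cipher_alt (message : String) (key : String) (encrypt : Bool) : String :=
  let r1 := "EKMFLGDQVZNTOWYHXUSPAIBRCJ".toList
  let r2 := "AJDKSIRUXBLHWTMCQGZNPYFVOE".toList
  let r3 := "BDFHJLCPRTXVZNYEIWGAKMUSQO".toList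
  let rf := "YRUHQSLDPXNGOKMIEBFZCWVJAT".toList
  let kcs := key.toList
  let p1 := pvPos0 kcs 0
  let p2 := pvPos0 kcs 1
  let p3 := pvPos0 kcs 2
  let inv1 := pvInv r1
  let inv2 := pvInv r2
  let inv3 := pvInv r3
  let mid := pvMid r2 r3 rf inv2 inv3 p2 p3
  let table := pvTable r1 inv1 mid
  let fin := (PySem.Chars.upper message.toList).foldl
    (fun (st : Int × List Char) ch =>
      if PySem.Chars.isalpha ch then
        let q := PySem.Int.mod (st.1 + 1) 26
        (q, st.2 ++ [PySem.List.pyGetD (PySem.List.pyGetD table q []) ((ch.toNat : Int) - 65) ' '])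
      else (st.1, st.2 ++ [ch]))
    (p1, [])
  String.ofList fin.2

-- ===== PRECONDITION & SPEC =====
def Spec_enigma_cipher (message : String) (key : String) (encrypt : Bool) (out : String) : Prop := out = enigma_cipher_alt message key encrypt
instance (message : String) (key : String) (encrypt : Bool) (out : String) : Decidable (Spec_enigma_cipher message key encrypt out) := by unfold Spec_enigma_cipher; infer_instance

-- ===== CLAIM (what is proved, stated in full; the proofs are below) =====
def Claim_equal_enigma_cipher : Prop := ∀ (message : String) (key : String) (encrypt : Bool), Dom_enigma_cipher message key encrypt → Spec_enigma_cipher message key encrypt (enigma_cipher message key encrypt)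

-- ===== LEMMAS AND PROOFS =====

def stepF (w : List Char) (p x : Int) : Int :=
  PySem.Int.mod (((PySem.List.pyGetD w (PySem.Int.mod (x + p) 26) 'A').toNat : Int) - 65 - p) 26

def stepB (inv : List Int) (p x : Int) : Int :=
  PySem.Int.mod (PySem.List.pyGetD inv (PySem.Int.mod (x + p) 26) 0 - p) 26

def reflOrd (rf : List Char) (x : Int) : Int :=
  ((PySem.List.pyGetD rf x 'A').toNat : Int) - 65

theorem ordOf (m : Int) (h0 : 0 ≤ m) (h1 : m < 26) :
    ((Char.ofNat (m + 65).toNat).toNat : Int) = m + 65 := by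
  have hv : (m + 65).toNat.isValidChar := Or.inl (by omega)
  rw [Char.toNat_ofNat, if_pos hv]; omega

theorem stepF_bounds (w : List Char) (p x : Int) : 0 ≤ stepF w p x ∧ stepF w p x < 26 :=
  ⟨PySem.Int.mod_nonneg _ (by norm_num), PySem.Int.mod_lt _ (by norm_num)⟩

theorem stepB_bounds (inv : List Int) (p x : Int) : 0 ≤ stepB inv p x ∧ stepB inv p x < 26 :=
  ⟨PySem.Int.mod_nonneg _ (by norm_num), PySem.Int.mod_lt _ (by norm_num)⟩

theorem fwdEq (w : List Char) (p x : Int) (h0 : 0 ≤ x) (h1 : x < 26) :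
    pvRotorFwd w p (Char.ofNat (x + 65).toNat) = Char.ofNat ((stepF w p x + 65).toNat) := by
  simp only [pvRotorFwd, stepF, ordOf x h0 h1]
  norm_num

theorem bwdEq (w : List Char) (inv : List Int) (p x : Int) (h0 : 0 ≤ x) (h1 : x < 26)
    (hfind : ∀ y : Int, 0 ≤ y → y < 26 →
      PySem.Chars.find w [Char.ofNat (y + 65).toNat] = PySem.List.pyGetD inv y 0) :
    pvRotorBwd w p (Char.ofNat (x + 65).toNat) = Char.ofNat ((stepB inv p x + 65).toNat) := by
  simp only [pvRotorBwd, stepB, ordOf x h0 h1]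
  rw [show x + 65 - 65 + p = x + p by ring,
    hfind _ (PySem.Int.mod_nonneg _ (by norm_num)) (PySem.Int.mod_lt _ (by norm_num))]

theorem reflEq (x : Int) (h0 : 0 ≤ x) (h1 : x < 26) :
    pvReflect "YRUHQSLDPXNGOKMIEBFZCWVJAT".toList (Char.ofNat (x + 65).toNat)
      = Char.ofNat ((reflOrd "YRUHQSLDPXNGOKMIEBFZCWVJAT".toList x + 65).toNat)
    ∧ 0 ≤ reflOrd "YRUHQSLDPXNGOKMIEBFZCWVJAT".toList x
    ∧ reflOrd "YRUHQSLDPXNGOKMIEBFZCWVJAT".toList x < 26 := by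
  interval_cases x <;> exact ⟨by decide, by decide, by decide⟩

theorem findInv1 (y : Int) (h0 : 0 ≤ y) (h1 : y < 26) :
    PySem.Chars.find "EKMFLGDQVZNTOWYHXUSPAIBRCJ".toList [Char.ofNat (y + 65).toNat]
      = PySem.List.pyGetD (pvInv "EKMFLGDQVZNTOWYHXUSPAIBRCJ".toList) y 0 := by
  interval_cases y <;> decide

theorem findInv2 (y : Int) (h0 : 0 ≤ y) (h1 : y < 26) :
    PySem.Chars.find "AJDKSIRUXBLHWTMCQGZNPYFVOE".toList [Char.ofNat (y + 65).toNat]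
      = PySem.List.pyGetD (pvInv "AJDKSIRUXBLHWTMCQGZNPYFVOE".toList) y 0 := by
  interval_cases y <;> decide

theorem findInv3 (y : Int) (h0 : 0 ≤ y) (h1 : y < 26) :
    PySem.Chars.find "BDFHJLCPRTXVZNYEIWGAKMUSQO".toList [Char.ofNat (y + 65).toNat]
      = PySem.List.pyGetD (pvInv "BDFHJLCPRTXVZNYEIWGAKMUSQO".toList) y 0 := by
  interval_cases y <;> decide

theorem pyGetD_map_pyRange26 {β : Type} (f : Int → β) (y : Int) (d : β) (h0 : 0 ≤ y) (h1 : y < 26) :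
    PySem.List.pyGetD (List.map f (PySem.List.pyRange 0 26 1)) y d = f y := by
  have hy : y = ((y.toNat : Nat) : Int) := by omega
  rw [hy]
  exact PySem.List.pyGetD_map_pyRange f 26 y.toNat d (by omega)

theorem midEq (r2 r3 rf : List Char) (inv2 inv3 : List Int) (p2 p3 y : Int)
    (h0 : 0 ≤ y) (h1 : y < 26) :
    PySem.List.pyGetD (pvMid r2 r3 rf inv2 inv3 p2 p3) y 0
      = stepB inv2 p2 (stepB inv3 p3 (reflOrd rf (stepF r3 p3 (stepF r2 p2 y)))) := by
  rw [pvMid, pyGetD_map_pyRange26 _ y 0 h0 h1]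
  rfl

theorem tableEq (r1 : List Char) (inv1 mid : List Int) (p c : Int)
    (hp0 : 0 ≤ p) (hp1 : p < 26) (hc0 : 0 ≤ c) (hc1 : c < 26) :
    PySem.List.pyGetD (PySem.List.pyGetD (pvTable r1 inv1 mid) p []) c ' '
      = Char.ofNat ((PySem.Int.mod (PySem.List.pyGetD inv1 (PySem.Int.mod (PySem.List.pyGetD mid (stepF r1 p c) 0 + p) 26) 0 - p) 26 + 65).toNat) := by
  rw [pvTable, pyGetD_map_pyRange26 _ p _ hp0 hp1, pyGetD_map_pyRange26 _ c _ hc0 hc1]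
  rfl

theorem coreEq (p1 p2 p3 x : Int) (h10 : 0 ≤ p1) (h11 : p1 < 26)
    (hx0 : 0 ≤ x) (hx1 : x < 26) :
    pvRotorBwd "EKMFLGDQVZNTOWYHXUSPAIBRCJ".toList p1
      (pvRotorBwd "AJDKSIRUXBLHWTMCQGZNPYFVOE".toList p2
        (pvRotorBwd "BDFHJLCPRTXVZNYEIWGAKMUSQO".toList p3
          (pvReflect "YRUHQSLDPXNGOKMIEBFZCWVJAT".toList
            (pvRotorFwd "BDFHJLCPRTXVZNYEIWGAKMUSQO".toList p3
              (pvRotorFwd "AJDKSIRUXBLHWTMCQGZNPYFVOE".toList p2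
                (pvRotorFwd "EKMFLGDQVZNTOWYHXUSPAIBRCJ".toList p1
                  (Char.ofNat (x + 65).toNat)))))))
      = PySem.List.pyGetD (PySem.List.pyGetD
          (pvTable "EKMFLGDQVZNTOWYHXUSPAIBRCJ".toList (pvInv "EKMFLGDQVZNTOWYHXUSPAIBRCJ".toList)
            (pvMid "AJDKSIRUXBLHWTMCQGZNPYFVOE".toList "BDFHJLCPRTXVZNYEIWGAKMUSQO".toList
              "YRUHQSLDPXNGOKMIEBFZCWVJAT".toList (pvInv "AJDKSIRUXBLHWTMCQGZNPYFVOE".toList)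
              (pvInv "BDFHJLCPRTXVZNYEIWGAKMUSQO".toList) p2 p3)) p1 []) x ' ' := by
  obtain ⟨a0, a1⟩ := stepF_bounds "EKMFLGDQVZNTOWYHXUSPAIBRCJ".toList p1 x
  obtain ⟨b0, b1⟩ := stepF_bounds "AJDKSIRUXBLHWTMCQGZNPYFVOE".toList p2 (stepF "EKMFLGDQVZNTOWYHXUSPAIBRCJ".toList p1 x)
  obtain ⟨c0, c1⟩ := stepF_bounds "BDFHJLCPRTXVZNYEIWGAKMUSQO".toList p3 (stepF "AJDKSIRUXBLHWTMCQGZNPYFVOE".toList p2 (stepF "EKMFLGDQVZNTOWYHXUSPAIBRCJ".toList p1 x))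
  obtain ⟨hre, hr0, hr1⟩ := reflEq (stepF "BDFHJLCPRTXVZNYEIWGAKMUSQO".toList p3 (stepF "AJDKSIRUXBLHWTMCQGZNPYFVOE".toList p2 (stepF "EKMFLGDQVZNTOWYHXUSPAIBRCJ".toList p1 x))) c0 c1
  obtain ⟨d0, d1⟩ := stepB_bounds (pvInv "BDFHJLCPRTXVZNYEIWGAKMUSQO".toList) p3 (reflOrd "YRUHQSLDPXNGOKMIEBFZCWVJAT".toList (stepF "BDFHJLCPRTXVZNYEIWGAKMUSQO".toList p3 (stepF "AJDKSIRUXBLHWTMCQGZNPYFVOE".toList p2 (stepF "EKMFLGDQVZNTOWYHXUSPAIBRCJ".toList p1 x))))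
  obtain ⟨e0, e1⟩ := stepB_bounds (pvInv "AJDKSIRUXBLHWTMCQGZNPYFVOE".toList) p2 (stepB (pvInv "BDFHJLCPRTXVZNYEIWGAKMUSQO".toList) p3 (reflOrd "YRUHQSLDPXNGOKMIEBFZCWVJAT".toList (stepF "BDFHJLCPRTXVZNYEIWGAKMUSQO".toList p3 (stepF "AJDKSIRUXBLHWTMCQGZNPYFVOE".toList p2 (stepF "EKMFLGDQVZNTOWYHXUSPAIBRCJ".toList p1 x)))))
  rw [fwdEq _ _ _ hx0 hx1, fwdEq _ _ _ a0 a1, fwdEq _ _ _ b0 b1, hre,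
      bwdEq _ _ _ _ hr0 hr1 findInv3, bwdEq _ _ _ _ d0 d1 findInv2, bwdEq _ _ _ _ e0 e1 findInv1,
      tableEq _ _ _ _ _ h10 h11 hx0 hx1,
      midEq _ _ _ _ _ _ _ _ a0 a1]
  rfl

theorem rotIter (k : Nat) : ∀ (p : Int), 0 ≤ p → p < 26 →
    (List.range k).foldl (fun q _ => pvRotatePos q) p = PySem.Int.mod (p + k) 26 := by
  induction k with
  | zero =>
    intro p h0 h1
    simp only [List.range_zero, List.foldl_nil, Nat.cast_zero, add_zero,
      PySem.Int.mod_eq_emod_of_pos (by norm_num : (0:Int) < 26)]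
    omega
  | succ n ih =>
    intro p h0 h1
    rw [List.range_succ, List.foldl_append, ih p h0 h1]
    simp only [List.foldl_cons, List.foldl_nil, pvRotatePos,
      PySem.Int.mod_eq_emod_of_pos (by norm_num : (0:Int) < 26)]
    omega

theorem spinEq (n : Int) :
    (PySem.List.pyRange 0 n 1).foldl (fun q _ => pvRotatePos q) 0
      = if 0 < n then PySem.Int.mod n 26 else 0 := by
  by_cases h : n ≤ 0
  · rw [PySem.List.pyRange_one_eq_nil h, if_neg (by omega)]
    rfl
  · rw [PySem.List.pyRange_one, List.foldl_map, rotIter _ 0 (by norm_num) (by norm_num),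
      if_pos (by omega : (0:Int) < n)]
    congr 1
    omega

theorem upperAlphaBound (c : Char) (h : PySem.Chars.isalpha (PySem.Chars.upperChar c) = true) :
    65 ≤ (PySem.Chars.upperChar c).toNat ∧ (PySem.Chars.upperChar c).toNat ≤ 90 := by
  simp only [PySem.Chars.upperChar] at h ⊢
  by_cases hL : PySem.Chars.islower c = true
  · rw [if_pos hL] at h ⊢
    simp [PySem.Chars.islower, Char.le_def] at hL
    have h97 : 97 ≤ c.toNat := hL.1
    have h122 : c.toNat ≤ 122 := hL.2
    have hv : (c.toNat - 32).isValidChar := Or.inl (by omega)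
    rw [Char.toNat_ofNat, if_pos hv]
    omega
  · rw [if_neg hL] at h ⊢
    simp [PySem.Chars.isalpha, PySem.Chars.isupper, PySem.Chars.islower, Char.le_def] at h hL
    rcases h with h | h
    · exact ⟨h.1, h.2⟩
    · have h97 : 97 ≤ c.toNat := h.1
      have h122 : c.toNat ≤ 122 := h.2
      have hgt : (122:Nat) < c.toNat := hL h.1
      omega

theorem posEq (key : List Char) :
    ((PySem.List.enumerate (PySem.List.slice key none (some 3)) 0).foldl
      (fun (st : Int × Int × Int) iv =>
        let n := ((PySem.Chars.upperChar iv.2).toNat : Int) - 65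
        let spin := fun (p : Int) => (PySem.List.pyRange 0 n 1).foldl (fun q _ => pvRotatePos q) p
        if iv.1 = 0 then (spin st.1, st.2.1, st.2.2)
        else if iv.1 = 1 then (st.1, spin st.2.1, st.2.2)
        else (st.1, st.2.1, spin st.2.2)) ((0 : Int), (0 : Int), (0 : Int)))
    = (pvPos0 key 0, pvPos0 key 1, pvPos0 key 2) := by
  have hs : PySem.List.slice key none (some 3) = key.take 3 := by simp [PySem.List.slice]
  rw [hs]
  match key with
  | [] => decide
  | [a] =>
    simp only [List.take, PySem.List.enumerate, List.foldl_cons, List.foldl_nil]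
    norm_num [spinEq, pvPos0]
  | [a, b] =>
    simp only [List.take, PySem.List.enumerate, List.foldl_cons, List.foldl_nil]
    norm_num [spinEq, pvPos0]
    simp [pysem]
  | a :: b :: c :: rest =>
    simp only [List.take, PySem.List.enumerate, List.foldl_cons, List.foldl_nil]
    norm_num [spinEq, pvPos0]
    refine ⟨?_, ?_, ?_⟩ <;> first
      | omega
      | (simp [pysem]; try omega)

theorem loopEq (P2 P3 : Int) :
    ∀ (cs : List Char) (p : Int) (acc : List Char), 0 ≤ p → p < 26 →
    (∀ c ∈ cs, PySem.Chars.isalpha c = true → 65 ≤ c.toNat ∧ c.toNat ≤ 90) →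
    cs.foldl
      (fun (st : Int × List Char) ch =>
        if PySem.Chars.isalpha ch = true then
          (pvRotatePos st.1,
            st.2 ++ [pvRotorBwd "EKMFLGDQVZNTOWYHXUSPAIBRCJ".toList (pvRotatePos st.1)
              (pvRotorBwd "AJDKSIRUXBLHWTMCQGZNPYFVOE".toList P2
                (pvRotorBwd "BDFHJLCPRTXVZNYEIWGAKMUSQO".toList P3
                  (pvReflect "YRUHQSLDPXNGOKMIEBFZCWVJAT".toList
                    (pvRotorFwd "BDFHJLCPRTXVZNYEIWGAKMUSQO".toList P3
                      (pvRotorFwd "AJDKSIRUXBLHWTMCQGZNPYFVOE".toList P2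
                        (pvRotorFwd "EKMFLGDQVZNTOWYHXUSPAIBRCJ".toList (pvRotatePos st.1) ch))))))])
        else (st.1, st.2 ++ [ch])) (p, acc)
    = cs.foldl
      (fun (st : Int × List Char) ch =>
        if PySem.Chars.isalpha ch = true then
          (PySem.Int.mod (st.1 + 1) 26,
            st.2 ++ [PySem.List.pyGetD (PySem.List.pyGetD
              (pvTable "EKMFLGDQVZNTOWYHXUSPAIBRCJ".toList (pvInv "EKMFLGDQVZNTOWYHXUSPAIBRCJ".toList)
                (pvMid "AJDKSIRUXBLHWTMCQGZNPYFVOE".toList "BDFHJLCPRTXVZNYEIWGAKMUSQO".toList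
                  "YRUHQSLDPXNGOKMIEBFZCWVJAT".toList (pvInv "AJDKSIRUXBLHWTMCQGZNPYFVOE".toList)
                  (pvInv "BDFHJLCPRTXVZNYEIWGAKMUSQO".toList) P2 P3))
              (PySem.Int.mod (st.1 + 1) 26) []) ((ch.toNat : Int) - 65) ' '])
        else (st.1, st.2 ++ [ch])) (p, acc) := by
  intro cs
  induction cs with
  | nil => intro p acc _ _ _; simp only [List.foldl_nil]
  | cons ch tl ih =>
    intro p acc hp0 hp1 hmem
    simp only [List.foldl_cons]
    by_cases ha : PySem.Chars.isalpha ch = true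
    · rw [if_pos ha, if_pos ha]
      have hx := hmem ch (by simp) ha
      have hq0 : 0 ≤ PySem.Int.mod (p + 1) 26 := PySem.Int.mod_nonneg _ (by norm_num)
      have hq1 : PySem.Int.mod (p + 1) 26 < 26 := PySem.Int.mod_lt _ (by norm_num)
      have htn : ((((ch.toNat : Int) - 65) + 65).toNat) = ch.toNat := by omega
      have hch' : Char.ofNat ((((ch.toNat : Int) - 65) + 65).toNat) = ch := by
        rw [htn]; exact Char.ofNat_toNat ch
      have hcore := coreEq (PySem.Int.mod (p + 1) 26) P2 P3 ((ch.toNat : Int) - 65)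
        hq0 hq1 (by omega) (by omega)
      rw [hch'] at hcore
      have hpr : pvRotatePos p = PySem.Int.mod (p + 1) 26 := rfl
      rw [hpr, hcore]
      exact ih _ _ hq0 hq1 (fun c hc => hmem c (by simp [hc]))
    · rw [if_neg ha, if_neg ha]
      exact ih _ _ hp0 hp1 (fun c hc => hmem c (by simp [hc]))

theorem memUpper (l : List Char) :
    ∀ c ∈ PySem.Chars.upper l, PySem.Chars.isalpha c = true → 65 ≤ c.toNat ∧ c.toNat ≤ 90 := by
  intro c hc
  obtain ⟨c0, -, rfl⟩ := List.mem_map.1 hc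
  exact upperAlphaBound c0

theorem pos0Bounds (k : List Char) (i : Int) : 0 ≤ pvPos0 k i ∧ pvPos0 k i < 26 := by
  unfold pvPos0
  dsimp only
  split_ifs with h1 h2
  · exact ⟨PySem.Int.mod_nonneg _ (by norm_num), PySem.Int.mod_lt _ (by norm_num)⟩
  · norm_num
  · norm_num

-- ===== VERDICT (by name: the statement is the Claim_ definition above) =====
theorem enigma_cipher_spec : Claim_equal_enigma_cipher := by
  intro message key encrypt _
  unfold Spec_enigma_cipher
  simp only [enigma_cipher, enigma_cipher_alt]
  rw [posEq key.toList]
  simp only []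
  exact congrArg (fun l => String.ofList l)
    (congrArg Prod.snd
      (loopEq (pvPos0 key.toList 1) (pvPos0 key.toList 2) (PySem.Chars.upper message.toList)
        (pvPos0 key.toList 0) [] (pos0Bounds key.toList 0).1 (pos0Bounds key.toList 0).2
        (memUpper message.toList)))
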